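-- pv_equiv track=rewrite | github.com/Alexander-philip-sage/algorithm_challenges | word_mash.py | solution
-- ===== SOURCE A (Python) =====
-- from typing import List
--
-- def solution(arr: List[str]) -> str:
--     longest = 0
--     ##O(len(arr))
--     for wrd in arr:
--         if len(wrd) > longest:
--             longest = len(wrd)
--     ret = ''
--     ##O(longest*len(arr))
--     for i in range(longest):
--         for wrd in arr:
--             if len(wrd) >i:
--                 ret += wrd[i]
--     return ret
-- ===== SOURCE B (Python) =====
-- from typing import List
--
-- def solution(arr: List[str]) -> str:
--     # column scan keeping only still-active words; exhausted words are dropped once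
--     active = [w for w in arr if w]
--     out = []
--     i = 0
--     while active:
--         out.append(''.join(w[i] for w in active))
--         active = [w for w in active if len(w) > i + 1]
--         i += 1
--     return ''.join(out)
-- ===== Notes on version B (the rewrite author's own statement) =====
-- stated objective: alternative
-- what changed: A rescans the whole word list for every column index up to the longest length; B keeps an ordered list of still-active words, joins their i-th characters per column and drops a word permanently once it is exhausted, so exhausted words are never revisited.
import Mathlib
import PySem

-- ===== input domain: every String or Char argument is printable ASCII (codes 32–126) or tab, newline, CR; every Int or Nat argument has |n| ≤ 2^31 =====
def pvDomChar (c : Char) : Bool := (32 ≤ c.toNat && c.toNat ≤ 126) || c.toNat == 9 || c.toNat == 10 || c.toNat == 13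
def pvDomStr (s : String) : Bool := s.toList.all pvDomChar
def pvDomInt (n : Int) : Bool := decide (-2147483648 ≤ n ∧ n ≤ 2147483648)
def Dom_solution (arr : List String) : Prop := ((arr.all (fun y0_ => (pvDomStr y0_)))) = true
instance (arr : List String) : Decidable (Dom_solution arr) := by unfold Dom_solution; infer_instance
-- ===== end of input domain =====

-- B replaces A's rescan of every word per column by an ordered active-word list that drops each word once it is exhausted (objective: alternative; return value only, no mutation).


-- ===== PORT A =====
-- wrd[i] is only read under the guard len(wrd) > i with i ≥ 0, so List.getD is exact there
def solution (arr : List String) : String :=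
  let ws := arr.map String.toList
  let longest := ws.foldl (fun longest wrd => if wrd.length > longest then wrd.length else longest) 0
  let ret := (List.range longest).foldl (fun ret i =>
    ws.foldl (fun ret wrd => if wrd.length > i then ret ++ [wrd.getD i ' '] else ret) ret) []
  String.mk ret

-- ===== PORT B =====
-- termination measure lemma for the while loop (cited by decreasing_by)
theorem pvAltMeasure (l : List (List Char)) (i : Nat) :
    ((l.filter (fun w => w.length > i + 1)).map (fun w => w.length - (i + 1))).sum
      + (l.filter (fun w => w.length > i + 1)).length
      ≤ (l.map (fun w => w.length - i)).sum := by
  induction l with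
  | nil => simp
  | cons w l ih =>
    rw [List.filter_cons]
    by_cases h : i + 1 < w.length <;>
      simp only [gt_iff_lt, h, decide_true, decide_false, Bool.false_eq_true, if_true, if_false,
        List.map_cons, List.sum_cons, List.length_cons] <;>
      simp only [gt_iff_lt] at ih <;> omega

-- w[i] is only read for active words, which satisfy len(w) > i, so List.getD is exact
def altLoop (active : List (List Char)) (i : Nat) : List Char :=
  match active with
  | [] => []
  | w :: rest =>
    ((w :: rest).map (fun w => w.getD i ' ')) ++
      altLoop ((w :: rest).filter (fun w => w.length > i + 1)) (i + 1)
termination_by (active.map (fun w => w.length - i)).sum + active.length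
decreasing_by
  have h := pvAltMeasure (w :: rest) i
  simp only [List.map_cons, List.sum_cons, List.length_cons] at *
  omega

def solution_alt (arr : List String) : String :=
  String.mk (altLoop ((arr.map String.toList).filter (fun w => w.length > 0)) 0)

-- ===== PRECONDITION & SPEC =====
def Spec_solution (arr : List String) (out : String) : Prop := out = solution_alt arr
instance (arr : List String) (out : String) : Decidable (Spec_solution arr out) := by unfold Spec_solution; infer_instance

-- ===== CLAIM (what is proved, stated in full; the proofs are below) =====
def Claim_equal_solution : Prop := ∀ (arr : List String), Dom_solution arr → Spec_solution arr (solution arr)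

-- ===== LEMMAS AND PROOFS =====

-- column i of the word list: the characters at index i of the words long enough
def col (ws : List (List Char)) (i : Nat) : List Char :=
  (ws.filter (fun w => w.length > i)).map (fun w => w.getD i ' ')

theorem inner_foldl (ws : List (List Char)) (i : Nat) (ret : List Char) :
    ws.foldl (fun ret wrd => if wrd.length > i then ret ++ [wrd.getD i ' '] else ret) ret
      = ret ++ col ws i := by
  induction ws generalizing ret with
  | nil => simp [col]
  | cons w l ih =>
    by_cases h : w.length > i <;> simp [col, h] at *
    · simp [ih]
    · simp [ih]

theorem outer_foldl (ws : List (List Char)) (n : Nat) :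
    (List.range n).foldl (fun ret i =>
        ws.foldl (fun ret wrd => if wrd.length > i then ret ++ [wrd.getD i ' '] else ret) ret) []
      = ((List.range n).map (col ws)).flatten := by
  suffices h : ∀ (L : List Nat) (acc : List Char),
      L.foldl (fun ret i =>
        ws.foldl (fun ret wrd => if wrd.length > i then ret ++ [wrd.getD i ' '] else ret) ret) acc
      = acc ++ (L.map (col ws)).flatten by
    simpa using h (List.range n) []
  intro L
  induction L with
  | nil => simp
  | cons j L ih =>
    intro acc
    simp only [List.foldl_cons, List.map_cons, List.flatten_cons]
    rw [inner_foldl, ih, List.append_assoc]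

theorem foldl_max_le (ws : List (List Char)) (acc : Nat) :
    acc ≤ ws.foldl (fun a w => if w.length > a then w.length else a) acc := by
  induction ws generalizing acc with
  | nil => simp
  | cons w l ih =>
    by_cases h : w.length > acc <;> simp [h]
    · exact le_trans (le_of_lt h) (ih _)
    · exact ih _
theorem mem_le_foldl_max (ws : List (List Char)) (acc : Nat) (w : List Char) (hw : w ∈ ws) :
    w.length ≤ ws.foldl (fun a w => if w.length > a then w.length else a) acc := by
  induction ws generalizing acc with
  | nil => cases hw
  | cons x l ih =>
    rcases List.mem_cons.mp hw with h | h
    · subst h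
      by_cases hx : w.length > acc <;> simp [hx]
      · exact foldl_max_le l _
      · exact le_trans (le_of_not_gt hx) (foldl_max_le l _)
    · by_cases hx : x.length > acc <;> simp [hx] <;> exact ih _ h

theorem altLoop_eq_cols (n : Nat) : ∀ (ws : List (List Char)) (i : Nat),
    (∀ w ∈ ws, w.length ≤ i + n) →
    altLoop (ws.filter (fun w => w.length > i)) i = ((List.range' i n).map (col ws)).flatten := by
  induction n with
  | zero =>
    intro ws i hb
    have : ws.filter (fun w => w.length > i) = [] := by
      apply List.filter_eq_nil_iff.mpr
      intro w hw
      simpa using Nat.not_lt.mpr (by simpa using hb w hw)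
    simp [this, altLoop]
  | succ n ih =>
    intro ws i hb
    cases hf : ws.filter (fun w => w.length > i) with
    | nil =>
      have hall : ∀ w ∈ ws, ¬ (w.length > i) := by
        intro w hw
        have := List.filter_eq_nil_iff.mp hf w hw
        simpa using this
      have hcol : ∀ j, i ≤ j → col ws j = [] := by
        intro j hj
        unfold col
        have : ws.filter (fun w => w.length > j) = [] := by
          apply List.filter_eq_nil_iff.mpr
          intro w hw
          simp only [decide_eq_true_eq]
          exact fun h => hall w hw (lt_of_le_of_lt hj h)
        simp [this]
      rw [altLoop]
      symm
      apply List.flatten_eq_nil_iff.mpr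
      intro l hl
      rcases List.mem_map.mp hl with ⟨j, hj, rfl⟩
      rcases List.mem_range'.mp hj with ⟨k, hk, rfl⟩
      exact hcol _ (by omega)
    | cons w rest =>
      rw [altLoop]
      have hff : (w :: rest).filter (fun w => w.length > i + 1)
          = ws.filter (fun w => w.length > i + 1) := by
        rw [← hf, List.filter_filter]
        congr 1
        funext x
        by_cases h : x.length > i + 1
        · have h2 : x.length > i := by omega
          simp [h, h2]
        · simp [h]
      have hrange : List.range' i (n + 1) = i :: List.range' (i + 1) n := by
        simp [List.range']
      rw [hff, ih ws (i + 1) (fun w hw => by have := hb w hw; omega), hrange]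
      have hcol : col ws i = w.getD i ' ' :: List.map (fun w => w.getD i ' ') rest := by
        unfold col; rw [hf, List.map_cons]
      simp [hcol]

-- ===== VERDICT (by name: the statement is the Claim_ definition above) =====
theorem solution_spec : Claim_equal_solution := by
  intro arr _
  unfold Spec_solution solution solution_alt
  simp only []
  set ws := arr.map String.toList with hws
  set longest := ws.foldl (fun longest wrd => if wrd.length > longest then wrd.length else longest) 0 with hl
  rw [outer_foldl]
  have hb : ∀ w ∈ ws, w.length ≤ 0 + longest := by
    intro w hw; simpa using mem_le_foldl_max ws 0 w hw
  rw [altLoop_eq_cols longest ws 0 hb]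
  rw [show List.range' 0 longest = List.range longest from List.range_eq_range'.symm]
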